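-- pv_equiv track=rewrite | github.com/HanJin996/2023Chinasoft | recoder/runsolvereplaceYES2.py | getcopyid
-- ===== SOURCE A (Python) =====
-- def find_all(sub,s):
-- 	index_list = []
-- 	index = s.find(sub)
-- 	while index != -1:
-- 		index_list.append(index)
-- 		index = s.find(sub,index+1)
--
-- 	if len(index_list) > 0:
-- 		return index_list
-- 	else:
-- 		return []
--
-- def getcopyid(nls, name, idx):
--   original = " ".join(nls)
--   idxs = find_all(name, original)#original.find(name)
--   if len(idxs) != 0:
--     minv = 100000
--     idxx = -1
--     for x in idxs:
--       tmpid = len(original[:x].replace("^", "").split())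
--       if minv > abs(idx - tmpid):
--         minv = abs(idx - tmpid)
--         idxx = tmpid
--     return 2000000 + idxx
--   return -1
-- ===== SOURCE B (Python) =====
-- def getcopyid(nls, name, idx):
--     # One left-to-right pass: walk the occurrences of `name` with str.find and
--     # maintain the prefix word-count incrementally up to each occurrence,
--     # instead of re-splitting the whole prefix original[:x] at every occurrence.
--     original = " ".join(nls)
--     wc = 0              # words in original[:i] after removing '^'
--     in_word = False     # inside a run that already contains a counted character
--     i = 0               # scan cursor
--     minv = 100000
--     idxx = -1
--     found = False
--     m = original.find(name)
--     while m != -1: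
--         while i < m:
--             c = original[i]
--             if c.isspace():
--                 in_word = False
--             elif c != '^':
--                 if not in_word:
--                     wc += 1
--                     in_word = True
--             i += 1
--         found = True
--         d = abs(idx - wc)
--         if d < minv:
--             minv = d
--             idxx = wc
--         m = original.find(name, m + 1)
--     return 2000000 + idxx if found else -1
-- ===== Notes on version B (the rewrite author's own statement) =====
-- stated objective: alternative
-- what changed: A collects all match positions with find_all and, for every occurrence, re-splits the whole prefix original[:x].replace('^','').split() to get its word index; B makes one left-to-right pass, walking the occurrences with str.find while maintaining the prefix word-count and in-word flag incrementally, so no prefix is ever re-scanned.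
import Mathlib
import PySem

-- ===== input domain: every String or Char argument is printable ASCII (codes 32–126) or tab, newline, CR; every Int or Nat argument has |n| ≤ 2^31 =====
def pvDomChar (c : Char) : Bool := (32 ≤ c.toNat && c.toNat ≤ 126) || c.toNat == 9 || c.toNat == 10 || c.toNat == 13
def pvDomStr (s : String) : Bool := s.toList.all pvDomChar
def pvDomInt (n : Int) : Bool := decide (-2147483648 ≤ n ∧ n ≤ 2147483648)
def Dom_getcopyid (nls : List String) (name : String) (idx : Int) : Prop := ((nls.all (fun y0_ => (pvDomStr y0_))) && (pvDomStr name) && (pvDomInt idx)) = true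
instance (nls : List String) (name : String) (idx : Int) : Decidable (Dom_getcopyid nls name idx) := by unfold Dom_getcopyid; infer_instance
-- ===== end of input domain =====

-- B replaces A's per-occurrence prefix split (re-splitting original[:x] at every match)
-- by one left-to-right pass maintaining the prefix word-count incrementally; objective: alternative.

-- ===== PORT A =====
-- helper for find_all's while loop: index = s.find(sub, start); strings are code-point lists.
-- The `start ≤ s.length` guard is a totality guard only: past the end s.find returns -1
-- and the Python loop stops, which is the same value [].
def findAllGo (sub s : List Char) (start : Nat) : List Int :=
  if hs : start ≤ s.length then
    let i := PySem.Chars.findFrom s sub (start : Int) none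
    if h : i = -1 then []
    else i :: findAllGo sub s (i.toNat + 1)
  else []
termination_by s.length + 1 - start
decreasing_by
  have h1 := (PySem.Chars.findFrom_natCast_spec s sub start hs h).1
  omega

def find_all (sub s : List Char) : List Int :=
  let indexList := findAllGo sub s 0
  if indexList.length > 0 then indexList else []

def getcopyid (nls : List String) (name : String) (idx : Int) : Int :=
  let original := PySem.Chars.join [' '] (nls.map String.toList)
  let idxs := find_all name.toList original
  if idxs.length ≠ 0 then
    let r := idxs.foldl (fun (p : Int × Int) x =>
      let tmpid : Int :=
        (PySem.Chars.split₀ (PySem.Chars.replace (PySem.List.slice original none (some x)) ['^'] [])).length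
      if p.1 > |idx - tmpid| then (|idx - tmpid|, tmpid) else p) (100000, -1)
    2000000 + r.2
  else -1

-- ===== PORT B =====
-- the character step of B's inner scan (in_word / word-count update)
def sstep (s : Int × Bool) (c : Char) : Int × Bool :=
  if PySem.Chars.isspace c then (s.1, false)
  else if c ≠ '^' then (if s.2 then s else (s.1 + 1, true))
  else s

-- B's while loop over m = original.find(name, start): scan forward from cursor i to the
-- match position (the inner `while i < m` is the fold of sstep over original[i:m]),
-- update (minv, idxx, found), continue from m+1; returns (idxx, found).
-- The `start ≤ orig.length` guard is a totality guard only: past the end find returns -1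
-- and the loop stops with the same (idxx, found).
def bgo (orig nameL : List Char) (idx : Int) (start i : Nat) (wc : Int) (inw : Bool)
    (minv idxx : Int) (found : Bool) : Int × Bool :=
  if hs : start ≤ orig.length then
    let m := PySem.Chars.findFrom orig nameL (start : Int) none
    if h : m = -1 then (idxx, found)
    else
      let s := ((orig.take m.toNat).drop i).foldl sstep (wc, inw)
      let d := |idx - s.1|
      if d < minv then bgo orig nameL idx (m.toNat + 1) m.toNat s.1 s.2 d s.1 true
      else bgo orig nameL idx (m.toNat + 1) m.toNat s.1 s.2 minv idxx true
  else (idxx, found)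
termination_by orig.length + 1 - start
decreasing_by
  all_goals
    have h1 := (PySem.Chars.findFrom_natCast_spec orig nameL start hs h).1
    omega

def getcopyid_alt (nls : List String) (name : String) (idx : Int) : Int :=
  let original := PySem.Chars.join [' '] (nls.map String.toList)
  let r := bgo original name.toList idx 0 0 0 false 100000 (-1) false
  if r.2 then 2000000 + r.1 else -1

-- ===== PRECONDITION & SPEC =====
def Spec_getcopyid (nls : List String) (name : String) (idx : Int) (out : Int) : Prop := out = getcopyid_alt nls name idx
instance (nls : List String) (name : String) (idx : Int) (out : Int) : Decidable (Spec_getcopyid nls name idx out) := by unfold Spec_getcopyid; infer_instance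

-- ===== CLAIM (what is proved, stated in full; the proofs are below) =====
def Claim_equal_getcopyid : Prop := ∀ (nls : List String) (name : String) (idx : Int), Dom_getcopyid nls name idx → Spec_getcopyid nls name idx (getcopyid nls name idx)

-- ===== LEMMAS AND PROOFS =====

-- number of whitespace-separated words of a character list (spec for len(s.split()))
def wcnt : List Char → Nat
  | [] => 0
  | c :: t =>
    if PySem.Chars.isspace c then wcnt t
    else 1 + wcnt (t.dropWhile (fun d => !PySem.Chars.isspace d))
termination_by l => l.length
decreasing_by
  · simp
  · have := List.length_dropWhile_le (fun d => !PySem.Chars.isspace d) t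
    simp only [List.length_cons]
    omega

-- word count of orig[:x] with '^' removed (what A calls tmpid)
def tmp (orig : List Char) (x : Nat) : Int := (wcnt ((orig.take x).filter (fun c => !(c == '^'))) : Int)

-- positions below j where nameL occurs in orig
def mb (nameL orig : List Char) (j : Nat) : List Nat :=
  (List.range j).filter (fun p => nameL.isPrefixOf (orig.drop p))

-- the min-distance update shared by both programs
def mstep (idx : Int) (p : Int × Int) (t : Int) : Int × Int :=
  if |idx - t| < p.1 then (|idx - t|, t) else p

-- (minv, idxx) after the matches below j
def pfold (nameL orig : List Char) (idx : Int) (j : Nat) : Int × Int :=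
  ((mb nameL orig j).map (tmp orig)).foldl (mstep idx) (100000, -1)

-- scan state after the first j characters
def sst (orig : List Char) (j : Nat) : Int × Bool := (orig.take j).foldl sstep (0, false)

theorem replace_go_caret (fuel : Nat) : ∀ (l acc : List Char), l.length ≤ fuel →
    PySem.Chars.replace.go ['^'] [] fuel l acc = acc.reverse ++ l.filter (fun c => !(c == '^')) := by
  induction fuel with
  | zero =>
    intro l acc h
    have : l = [] := List.eq_nil_of_length_eq_zero (Nat.le_zero.mp h)
    subst this
    simp [PySem.Chars.replace.go]
  | succ fuel ih =>
    intro l acc h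
    cases l with
    | nil => simp [PySem.Chars.replace.go]
    | cons c t =>
      by_cases hc : c = '^'
      · subst hc
        have hp : (['^'] : List Char).isPrefixOf ('^' :: t) = true := by simp [List.isPrefixOf]
        simp only [PySem.Chars.replace.go, hp, if_pos]
        simp only [List.length_cons, List.length_nil, List.drop_succ_cons, List.drop_zero, List.reverse_nil,
          List.nil_append]
        rw [ih t acc (by simpa using h)]
        simp
      · have hp : (['^'] : List Char).isPrefixOf (c :: t) = false := by
          simp [List.isPrefixOf]; exact fun h' => hc h'.symm
        simp only [PySem.Chars.replace.go, hp, Bool.false_eq_true, if_false]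
        rw [ih t (c :: acc) (by simpa using h)]
        simp [hc]

theorem replace_caret (l : List Char) :
    PySem.Chars.replace l ['^'] [] = l.filter (fun c => !(c == '^')) := by
  simp [PySem.Chars.replace]
  rw [replace_go_caret l.length l [] le_rfl]
  simp

theorem split_go_len (l : List Char) : ∀ (cur : List Char) (acc : List (List Char)),
    (PySem.Chars.split₀.go l cur acc).length =
      acc.length + (if cur.isEmpty then wcnt l else 1 + wcnt (l.dropWhile (fun d => !PySem.Chars.isspace d))) := by
  induction l with
  | nil =>
    intro cur acc
    cases cur <;> simp [PySem.Chars.split₀.go, wcnt]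
  | cons c t ih =>
    intro cur acc
    by_cases hc : PySem.Chars.isspace c
    · cases cur with
      | nil =>
        simp only [PySem.Chars.split₀.go, hc, if_pos, List.isEmpty_nil]
        rw [ih [] acc]
        simp [wcnt, hc, List.dropWhile_cons, hc]
      | cons a b =>
        simp only [PySem.Chars.split₀.go, hc, if_pos, List.isEmpty_cons, Bool.false_eq_true, if_false]
        rw [ih [] ((a :: b).reverse :: acc)]
        simp [wcnt, hc]
        omega
    · have hcb : (!PySem.Chars.isspace c) = true := by simp [hc]
      cases cur with
      | nil =>
        simp only [PySem.Chars.split₀.go, hc, Bool.false_eq_true, if_false, List.isEmpty_nil]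
        rw [ih [c] acc]
        simp [wcnt, hc]
      | cons a b =>
        simp only [PySem.Chars.split₀.go, hc, Bool.false_eq_true, if_false, List.isEmpty_cons]
        rw [ih (c :: a :: b) acc]
        simp [wcnt, hc, List.dropWhile_cons, hcb]

theorem split_len (l : List Char) : (PySem.Chars.split₀ l).length = wcnt l := by
  rw [PySem.Chars.split₀, split_go_len]
  simp

theorem dropWhile_filter_comm (t : List Char) :
    (t.filter (fun c => !(c == '^'))).dropWhile (fun d => !PySem.Chars.isspace d)
      = (t.dropWhile (fun d => !PySem.Chars.isspace d)).filter (fun c => !(c == '^')) := by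
  induction t with
  | nil => simp
  | cons c t ih =>
    by_cases hc : c = '^'
    · subst hc
      have : PySem.Chars.isspace '^' = false := by decide
      simp [this, ih]
    · by_cases hs : PySem.Chars.isspace c
      · simp [hc, hs]
      · simp [hc, hs, ih]

theorem scan_fst (l : List Char) : ∀ wc : Int,
    ((l.foldl sstep (wc, false)).1 = wc + wcnt (l.filter (fun c => !(c == '^')))
     ∧ (l.foldl sstep (wc, true)).1 =
         wc + wcnt ((l.dropWhile (fun d => !PySem.Chars.isspace d)).filter (fun c => !(c == '^')))) := by
  induction l with
  | nil => intro wc; simp [wcnt]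
  | cons c t ih =>
    intro wc
    by_cases hs : PySem.Chars.isspace c
    · have hc : c ≠ '^' := by intro h; subst h; exact absurd hs (by decide)
      constructor
      · simp only [List.foldl_cons, sstep, hs, if_pos]
        rw [(ih wc).1]
        simp [wcnt, hc, hs]
      · simp only [List.foldl_cons, sstep, hs, if_pos]
        rw [(ih wc).1]
        simp [wcnt, hc, hs, List.dropWhile_cons, wcnt]
    · by_cases hc : c = '^'
      · subst hc
        constructor
        · simp only [List.foldl_cons, sstep, hs, Bool.false_eq_true, if_false, ne_eq,
            not_true_eq_false, if_neg, if_false]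
          rw [(ih wc).1]
          simp
        · simp only [List.foldl_cons, sstep, hs, Bool.false_eq_true, if_false, ne_eq,
            not_true_eq_false, if_neg, if_false]
          rw [(ih wc).2]
          simp [List.dropWhile_cons, hs]
      · constructor
        · simp only [List.foldl_cons, sstep, hs, Bool.false_eq_true, if_false, ne_eq, hc,
            not_false_eq_true, if_pos, if_true]
          rw [(ih (wc + 1)).2]
          have hfc : (c == '^') = false := by simp [hc]
          simp [wcnt, hs, hfc, dropWhile_filter_comm]
          omega
        · simp only [List.foldl_cons, sstep, hs, Bool.false_eq_true, if_false, ne_eq, hc,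
            not_false_eq_true, if_pos, if_true]
          rw [(ih wc).2]
          simp [List.dropWhile_cons, hs]

theorem sst_fst (orig : List Char) (j : Nat) : (sst orig j).1 = tmp orig j := by
  have := (scan_fst (orig.take j) 0).1
  simp only [sst, tmp, this, zero_add]

theorem filter_range_split (N start m : Nat) (P : Nat → Bool) (h1 : start ≤ m) (h2 : m < N)
    (hP : P m = true) (hmin : ∀ j, start ≤ j → j < m → P j = false) :
    (List.range N).filter (fun j => start ≤ j && P j)
      = m :: (List.range N).filter (fun j => m + 1 ≤ j && P j) := by
  have hN : N = (m + 1) + (N - m - 1) := by omega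
  rw [hN, List.range_add, List.range_succ]
  simp only [List.filter_append]
  have e1 : (List.range m).filter (fun j => start ≤ j && P j) = [] := by
    rw [List.filter_eq_nil_iff]
    intro j hj
    simp only [List.mem_range] at hj
    by_cases hs : start ≤ j
    · simp [hs, hmin j hs hj]
    · simp [hs]
  have e2 : (List.range m).filter (fun j => m + 1 ≤ j && P j) = [] := by
    rw [List.filter_eq_nil_iff]
    intro j hj
    simp only [List.mem_range] at hj
    have : ¬ (m + 1 ≤ j) := by omega
    simp [this]
  have e3 : ([m].filter (fun j => start ≤ j && P j)) = [m] := by simp [h1, hP]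
  have e4 : ([m].filter (fun j => m + 1 ≤ j && P j)) = [] := by simp
  have e5 : ((List.range (N - m - 1)).map (fun x => m + 1 + x)).filter (fun j => start ≤ j && P j)
      = ((List.range (N - m - 1)).map (fun x => m + 1 + x)).filter (fun j => m + 1 ≤ j && P j) := by
    apply List.filter_congr
    intro j hj
    simp only [List.mem_map] at hj
    obtain ⟨x, _, rfl⟩ := hj
    have hs : start ≤ m + 1 + x := by omega
    have hm : m + 1 ≤ m + 1 + x := by omega
    simp [hs, hm]
  rw [e1, e2, e3, e4, e5]
  simp

theorem findAllGo_eq_aux (nameL orig : List Char) (d : Nat) : ∀ start : Nat,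
    orig.length + 1 - start ≤ d →
    findAllGo nameL orig start
      = ((List.range (orig.length + 1)).filter
          (fun j => start ≤ j && nameL.isPrefixOf (orig.drop j))).map (fun j : Nat => (j : Int)) := by
  induction d with
  | zero =>
    intro start hd
    have hs : ¬ start ≤ orig.length := by omega
    rw [findAllGo]
    simp only [hs, dite_false]
    have : (List.range (orig.length + 1)).filter
        (fun j => start ≤ j && nameL.isPrefixOf (orig.drop j)) = [] := by
      rw [List.filter_eq_nil_iff]
      intro j hj
      simp only [List.mem_range] at hj
      have : ¬ (start ≤ j) := by omega
      simp [this]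
    rw [this]; rfl
  | succ d ih =>
    intro start hd
    by_cases hs : start ≤ orig.length
    · rw [findAllGo]
      simp only [hs, dite_true]
      rw [PySem.Chars.findFrom_natCast orig nameL start hs]
      by_cases hr : PySem.Chars.find (orig.drop start) nameL = -1
      · simp only [hr, if_pos, dite_true]
        have hinf : ¬ nameL <:+: orig.drop start := (PySem.Chars.find_eq_neg_one_iff _ _).mp hr
        have : (List.range (orig.length + 1)).filter
            (fun j => start ≤ j && nameL.isPrefixOf (orig.drop j)) = [] := by
          rw [List.filter_eq_nil_iff]
          intro j hj
          simp only [Bool.and_eq_true, decide_eq_true_eq, List.isPrefixOf_iff_prefix, not_and]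
          intro hsj hpre
          apply hinf
          have : nameL <+: (orig.drop start).drop (j - start) := by
            rw [List.drop_drop]
            have : start + (j - start) = j := by omega
            rw [this]; exact hpre
          have hIn : PySem.Chars.isIn nameL (orig.drop start) = true :=
            (PySem.Chars.exists_prefix_drop_iff_isIn _ _).mp ⟨_, this⟩
          exact (PySem.Chars.isIn_iff_infix _ _).mp hIn
        rw [this]; rfl
      · have hge : 0 ≤ PySem.Chars.find (orig.drop start) nameL := by
          have := PySem.Chars.neg_one_le_find (orig.drop start) nameL
          omega
        set r := PySem.Chars.find (orig.drop start) nameL with hrdef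
        have hne : ¬ ((start : Int) + r = -1) := by omega
        rw [if_neg hr, dif_neg hne]
        have hspec := PySem.Chars.find_spec (s := orig.drop start) (sub := nameL) hge
        have hrlen : r ≤ (orig.drop start).length := PySem.Chars.find_le_length _ _
        simp only [List.length_drop] at hrlen
        set m := start + r.toNat with hmdef
        have hmlen : m ≤ orig.length := by omega
        have hPm : nameL.isPrefixOf (orig.drop m) = true := by
          rw [List.isPrefixOf_iff_prefix]
          have := hspec.1
          rwa [List.drop_drop] at this
        have hmin : ∀ j, start ≤ j → j < m → nameL.isPrefixOf (orig.drop j) = false := by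
          intro j hsj hjm
          rw [← Bool.not_eq_true, List.isPrefixOf_iff_prefix]
          have := hspec.2 (j - start) (by omega)
          intro hpre
          apply this
          rw [List.drop_drop]
          have : start + (j - start) = j := by omega
          rw [this]; exact hpre
        rw [filter_range_split (orig.length + 1) start m _ (by omega) (by omega) hPm hmin]
        have htn : ((start : Int) + r).toNat = m := by omega
        rw [htn]
        rw [ih (m + 1) (by omega)]
        rw [List.map_cons]
        congr 1
        omega
    · rw [findAllGo]
      simp only [hs, dite_false]
      have : (List.range (orig.length + 1)).filter
          (fun j => start ≤ j && nameL.isPrefixOf (orig.drop j)) = [] := by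
        rw [List.filter_eq_nil_iff]
        intro j hj
        simp only [List.mem_range] at hj
        have : ¬ (start ≤ j) := by omega
        simp [this]
      rw [this]; rfl

theorem findAllGo_eq (nameL orig : List Char) (start : Nat) :
    findAllGo nameL orig start
      = ((List.range (orig.length + 1)).filter
          (fun j => start ≤ j && nameL.isPrefixOf (orig.drop j))).map (fun j : Nat => (j : Int)) :=
  findAllGo_eq_aux nameL orig (orig.length + 1 - start) start le_rfl

theorem if_length_pos (l : List Int) : (if l.length > 0 then l else []) = l := by
  cases l <;> simp

theorem scan_chunk (orig : List Char) (i m : Nat) (him : i ≤ m) :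
    ((orig.take m).drop i).foldl sstep (sst orig i) = sst orig m := by
  conv_rhs => rw [sst, ← List.take_append_drop i (orig.take m)]
  rw [List.take_take, Nat.min_eq_left him, List.foldl_append]
  rfl

theorem bgo_spec_aux (orig nameL : List Char) (idx : Int) (d : Nat) :
    ∀ (start i : Nat) (wc : Int) (inw : Bool) (minv idxx : Int) (found : Bool),
    orig.length + 1 - start ≤ d → i ≤ start → (wc, inw) = sst orig i →
    bgo orig nameL idx start i wc inw minv idxx found
      = (((((List.range (orig.length + 1)).filter
              (fun j => start ≤ j && nameL.isPrefixOf (orig.drop j))).map (tmp orig)).foldl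
              (mstep idx) (minv, idxx)).2,
         found || !((List.range (orig.length + 1)).filter
              (fun j => start ≤ j && nameL.isPrefixOf (orig.drop j))).isEmpty) := by
  induction d with
  | zero =>
    intro start i wc inw minv idxx found hd hi hsst
    have hs : ¬ start ≤ orig.length := by omega
    rw [bgo]
    simp only [hs, dite_false]
    have hnil : (List.range (orig.length + 1)).filter
        (fun j => start ≤ j && nameL.isPrefixOf (orig.drop j)) = [] := by
      rw [List.filter_eq_nil_iff]
      intro j hj
      simp only [List.mem_range] at hj
      have : ¬ (start ≤ j) := by omega
      simp [this]
    rw [hnil]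
    simp
  | succ d ih =>
    intro start i wc inw minv idxx found hd hi hsst
    by_cases hs : start ≤ orig.length
    · rw [bgo]
      simp only [hs, dite_true]
      by_cases h : PySem.Chars.findFrom orig nameL (start : Int) none = -1
      · simp only [h, dite_true]
        rw [PySem.Chars.findFrom_natCast orig nameL start hs] at h
        have hr : PySem.Chars.find (orig.drop start) nameL = -1 := by
          by_contra hne
          rw [if_neg hne] at h
          have := PySem.Chars.neg_one_le_find (orig.drop start) nameL
          omega
        have hinf : ¬ nameL <:+: orig.drop start := (PySem.Chars.find_eq_neg_one_iff _ _).mp hr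
        have hnil : (List.range (orig.length + 1)).filter
            (fun j => start ≤ j && nameL.isPrefixOf (orig.drop j)) = [] := by
          rw [List.filter_eq_nil_iff]
          intro j hj
          simp only [Bool.and_eq_true, decide_eq_true_eq, List.isPrefixOf_iff_prefix, not_and]
          intro hsj hpre
          apply hinf
          have hpre' : nameL <+: (orig.drop start).drop (j - start) := by
            rw [List.drop_drop]
            have : start + (j - start) = j := by omega
            rw [this]; exact hpre
          have hIn : PySem.Chars.isIn nameL (orig.drop start) = true :=
            (PySem.Chars.exists_prefix_drop_iff_isIn _ _).mp ⟨_, hpre'⟩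
          exact (PySem.Chars.isIn_iff_infix _ _).mp hIn
        rw [hnil]
        simp
      · simp only [h, dite_false]
        have hspec := PySem.Chars.findFrom_natCast_spec orig nameL start hs h
        have hge : (start : Int) ≤ PySem.Chars.findFrom orig nameL (start : Int) none := hspec.1
        set M := PySem.Chars.findFrom orig nameL (start : Int) none with hM
        set m := M.toNat with hm
        have hstm : start ≤ m := by omega
        have hmlen : m ≤ orig.length := by
          rw [PySem.Chars.findFrom_natCast orig nameL start hs] at hM
          have h1 := PySem.Chars.find_le_length (orig.drop start) nameL
          simp only [List.length_drop] at h1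
          by_cases hr : PySem.Chars.find (orig.drop start) nameL = -1
          · rw [if_pos hr] at hM
            exact absurd hM h
          · rw [if_neg hr] at hM
            omega
        have hPm : nameL.isPrefixOf (orig.drop m) = true := by
          rw [List.isPrefixOf_iff_prefix]
          have := hspec.2.1
          exact this
        have hmin : ∀ j, start ≤ j → j < m → nameL.isPrefixOf (orig.drop j) = false := by
          intro j hsj hjm
          rw [← Bool.not_eq_true, List.isPrefixOf_iff_prefix]
          exact hspec.2.2 j (by exact_mod_cast hsj) (by omega)
        have hsplit := filter_range_split (orig.length + 1) start m
          (fun j => nameL.isPrefixOf (orig.drop j)) hstm (by omega) hPm hmin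
        rw [hsplit]
        have hscan : ((orig.take m).drop i).foldl sstep (wc, inw) = sst orig m := by
          rw [hsst]; exact scan_chunk orig i m (by omega)
        rw [hscan]
        rw [sst_fst]
        simp only [List.map_cons, List.foldl_cons]
        by_cases hlt : |idx - tmp orig m| < minv
        · rw [if_pos hlt]
          rw [ih (m + 1) m (tmp orig m) (sst orig m).2 |idx - tmp orig m| (tmp orig m) true
            (by omega) (by omega) (by rw [← sst_fst])]
          simp [mstep, hlt]
        · rw [if_neg hlt]
          rw [ih (m + 1) m (tmp orig m) (sst orig m).2 minv idxx true
            (by omega) (by omega) (by rw [← sst_fst])]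
          simp [mstep, hlt]
    · rw [bgo]
      simp only [hs, dite_false]
      have hnil : (List.range (orig.length + 1)).filter
          (fun j => start ≤ j && nameL.isPrefixOf (orig.drop j)) = [] := by
        rw [List.filter_eq_nil_iff]
        intro j hj
        simp only [List.mem_range] at hj
        have : ¬ (start ≤ j) := by omega
        simp [this]
      rw [hnil]
      simp

theorem alt_closed (nls : List String) (name : String) (idx : Int) :
    getcopyid_alt nls name idx
      = (if (mb name.toList (PySem.Chars.join [' '] (nls.map String.toList))
              ((PySem.Chars.join [' '] (nls.map String.toList)).length + 1)).isEmpty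
         then -1
         else 2000000 + (pfold name.toList (PySem.Chars.join [' '] (nls.map String.toList)) idx
              ((PySem.Chars.join [' '] (nls.map String.toList)).length + 1)).2) := by
  simp only [getcopyid_alt]
  rw [bgo_spec_aux (PySem.Chars.join [' '] (nls.map String.toList)) name.toList idx
      ((PySem.Chars.join [' '] (nls.map String.toList)).length + 1) 0 0 0 false 100000 (-1) false
      (by omega) (le_refl 0) rfl]
  have hfil : (List.range ((PySem.Chars.join [' '] (nls.map String.toList)).length + 1)).filter
        (fun j => 0 ≤ j && name.toList.isPrefixOf ((PySem.Chars.join [' '] (nls.map String.toList)).drop j))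
      = mb name.toList (PySem.Chars.join [' '] (nls.map String.toList))
          ((PySem.Chars.join [' '] (nls.map String.toList)).length + 1) := by
    simp [mb]
  rw [hfil]
  by_cases hM : (mb name.toList (PySem.Chars.join [' '] (nls.map String.toList))
      ((PySem.Chars.join [' '] (nls.map String.toList)).length + 1)) = [] <;> simp [hM, pfold, mstep]

theorem a_closed (nls : List String) (name : String) (idx : Int) :
    getcopyid nls name idx
      = (if (mb name.toList (PySem.Chars.join [' '] (nls.map String.toList))
              ((PySem.Chars.join [' '] (nls.map String.toList)).length + 1)).isEmpty
         then -1
         else 2000000 + (pfold name.toList (PySem.Chars.join [' '] (nls.map String.toList)) idx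
              ((PySem.Chars.join [' '] (nls.map String.toList)).length + 1)).2) := by
  have horig : find_all name.toList (PySem.Chars.join [' '] (nls.map String.toList))
      = (mb name.toList (PySem.Chars.join [' '] (nls.map String.toList))
          ((PySem.Chars.join [' '] (nls.map String.toList)).length + 1)).map (fun j : Nat => (j : Int)) := by
    rw [find_all, findAllGo_eq, if_length_pos]
    simp [mb]
  simp only [getcopyid, horig]
  have hfold : ((mb name.toList (PySem.Chars.join [' '] (nls.map String.toList))
        ((PySem.Chars.join [' '] (nls.map String.toList)).length + 1)).map (fun j : Nat => (j : Int))).foldl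
        (fun (p : Int × Int) x =>
          let tmpid : Int :=
            (PySem.Chars.split₀ (PySem.Chars.replace
              (PySem.List.slice (PySem.Chars.join [' '] (nls.map String.toList)) none (some x)) ['^'] [])).length
          if p.1 > |idx - tmpid| then (|idx - tmpid|, tmpid) else p) (100000, -1)
      = pfold name.toList (PySem.Chars.join [' '] (nls.map String.toList)) idx
          ((PySem.Chars.join [' '] (nls.map String.toList)).length + 1) := by
    rw [List.foldl_map, pfold, List.foldl_map]
    apply PySem.List.foldl_congr_mem
    intro p m _
    simp only [PySem.List.slice_to_natCast, replace_caret, split_len, tmp, mstep, gt_iff_lt]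
  rw [hfold]
  by_cases hM : (mb name.toList (PySem.Chars.join [' '] (nls.map String.toList))
      ((PySem.Chars.join [' '] (nls.map String.toList)).length + 1)) = [] <;> simp [hM]

-- ===== VERDICT (by name: the statement is the Claim_ definition above) =====
theorem getcopyid_spec : Claim_equal_getcopyid := by
  intro nls name idx _
  unfold Spec_getcopyid
  rw [a_closed, alt_closed]
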